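-- pv_equiv track=rewrite | github.com/tufts-ai-robotics-group/NovelGym | utils/hint_utils.py | get_hinted_items
-- ===== SOURCE A (Python) =====
-- def get_hinted_items(all_objects, hints, split_words=False):
--     hinted_items = []
--     hints = str(hints)
--     for obj, value in all_objects.items():
--         if split_words:
--             obj_components = obj.split("_") + value.split("_")
--         else:
--             obj_components = [obj, value]
--         for component in obj_components:
--             if component in hints:
--                 hinted_items.append(obj)
--                 break
--     return hinted_items
-- ===== SOURCE B (Python) =====
-- def get_hinted_items(all_objects, hints, split_words=False):
--     hints = str(hints)
--     if split_words:
--         components = lambda obj, value: obj.split("_") + value.split("_")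
--     else:
--         components = lambda obj, value: [obj, value]
--     # index: every substring of hints whose length is a needed component length
--     lengths = {len(c) for obj, value in all_objects.items() for c in components(obj, value)}
--     subs = {hints[i:i + k] for k in lengths for i in range(len(hints) - k + 1)}
--     return [obj for obj, value in all_objects.items()
--             if any(c in subs for c in components(obj, value))]
-- ===== Notes on version B (the rewrite author's own statement) =====
-- stated objective: faster
-- what changed: A scans the hints once per component (break-loop with a substring scan per component); B builds a substring index of the hints once (the set of all hint substrings of exactly the occurring component lengths) and selects objects by O(|c|) set-membership queries, removing the per-component scan of the hints.
import Mathlib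
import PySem

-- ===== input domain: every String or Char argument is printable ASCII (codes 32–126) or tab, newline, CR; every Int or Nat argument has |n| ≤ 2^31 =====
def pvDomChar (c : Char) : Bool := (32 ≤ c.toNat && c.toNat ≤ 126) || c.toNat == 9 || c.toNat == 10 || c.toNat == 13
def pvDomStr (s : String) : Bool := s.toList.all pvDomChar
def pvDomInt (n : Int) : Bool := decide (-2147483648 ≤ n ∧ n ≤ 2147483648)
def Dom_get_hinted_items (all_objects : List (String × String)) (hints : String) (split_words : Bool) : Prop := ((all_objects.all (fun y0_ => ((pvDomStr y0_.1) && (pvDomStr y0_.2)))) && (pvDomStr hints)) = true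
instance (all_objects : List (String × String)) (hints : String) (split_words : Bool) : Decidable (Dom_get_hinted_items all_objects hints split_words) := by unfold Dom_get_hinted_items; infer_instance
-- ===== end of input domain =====

-- B replaces the per-component substring scan of the hints by a substring index of the
-- hints (all substrings of the needed lengths, built once as a set) queried per component;
-- equivalence of A's scan-with-break and B's index-filter is proved on dicts (nodup keys).
-- ===== PORT A =====
-- inner 'for component in obj_components: if component in hints: append; break'
def pvHitA (obj_components : List String) (hints : String) : Bool :=
  match obj_components with
  | [] => false
  | component :: rest =>
      if PySem.Str.isIn component hints then true else pvHitA rest hints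

def get_hinted_items (all_objects : List (String × String)) (hints : String) (split_words : Bool) : List String :=
  all_objects.foldl (fun hinted_items p =>
    let obj_components :=
      if split_words then (PySem.Str.split? p.1 "_").getD [] ++ (PySem.Str.split? p.2 "_").getD []
      else [p.1, p.2]
    if pvHitA obj_components hints then hinted_items ++ [p.1] else hinted_items) []

-- ===== PORT B =====
-- components(obj, value)  (split? with "_" is always some: the separator is nonempty)
def pvComponents (split_words : Bool) (obj value : String) : List String :=
  if split_words then (PySem.Str.split? obj "_").getD [] ++ (PySem.Str.split? value "_").getD []
  else [obj, value]

-- lengths = {len(c) for obj, value in all_objects.items() for c in components(obj, value)}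
def pvLengths (all_objects : List (String × String)) (split_words : Bool) : PySem.Set Int :=
  PySem.Set.ofList (all_objects.flatMap (fun p => (pvComponents split_words p.1 p.2).map PySem.Str.len))

-- subs = {hints[i:i+k] for k in lengths for i in range(len(hints) - k + 1)}
def pvSubs (hints : String) (lengths : PySem.Set Int) : PySem.Set String :=
  PySem.Set.ofList (List.flatMap (fun k =>
    (PySem.List.pyRange 0 (PySem.Str.len hints - k + 1) 1).map
      (fun i => PySem.Str.slice hints (some i) (some (i + k)))) lengths)

def get_hinted_items_alt (all_objects : List (String × String)) (hints : String) (split_words : Bool) : List String :=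
  (all_objects.filter (fun p =>
    (pvComponents split_words p.1 p.2).any
      (fun c => (pvSubs hints (pvLengths all_objects split_words)).contains c))).map Prod.fst

-- ===== PRECONDITION & SPEC =====
-- Pre_ excludes association lists with duplicate keys: A's parameter is a Python dict,
-- which cannot hold two entries with the same key, so which entry survives there is an
-- artefact of dict construction, not of A.
def Pre_get_hinted_items (all_objects : List (String × String)) (hints : String) (split_words : Bool) : Prop :=
  (all_objects.map Prod.fst).Nodup

instance (all_objects : List (String × String)) (hints : String) (split_words : Bool) : Decidable (Pre_get_hinted_items all_objects hints split_words) := by unfold Pre_get_hinted_items; infer_instance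

def pvWitness_get_hinted_items : (List (String × String)) × String × Bool :=
  ([("oak_log", "wood"), ("iron_pickaxe", "tool")], "collect an oak log", true)

def Spec_get_hinted_items (all_objects : List (String × String)) (hints : String) (split_words : Bool) (out : List String) : Prop := out = get_hinted_items_alt all_objects hints split_words
instance (all_objects : List (String × String)) (hints : String) (split_words : Bool) (out : List String) : Decidable (Spec_get_hinted_items all_objects hints split_words out) := by unfold Spec_get_hinted_items; infer_instance

-- ===== CLAIM (what is proved, stated in full; the proofs are below) =====
def Claim_equal_get_hinted_items : Prop := ∀ (all_objects : List (String × String)) (hints : String) (split_words : Bool), Dom_get_hinted_items all_objects hints split_words → Pre_get_hinted_items all_objects hints split_words → Spec_get_hinted_items all_objects hints split_words (get_hinted_items all_objects hints split_words)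

-- ===== LEMMAS AND PROOFS =====

-- A's inner loop-with-break hits iff some component is a substring of the hints
theorem pvHitA_eq_any (comps : List String) (hints : String) :
    pvHitA comps hints = comps.any (fun c => PySem.Str.isIn c hints) := by
  induction comps with
  | nil => rfl
  | cons c rest ih =>
      simp only [pvHitA, List.any_cons, ih]
      cases PySem.Str.isIn c hints <;> simp

-- membership in B's substring index, for a string whose length is indexed
theorem mem_subs_iff (hints c : String) (L : List Int)
    (hL : ∀ k ∈ L, 0 ≤ k) (hc : PySem.Str.len c ∈ L) :
    (c ∈ List.flatMap (fun k =>
        (PySem.List.pyRange 0 (PySem.Str.len hints - k + 1) 1).map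
          (fun i => PySem.Str.slice hints (some i) (some (i + k)))) L)
      ↔ PySem.Str.isIn c hints = true := by
  rw [PySem.Str.isIn_iff_infix]
  constructor
  · intro h
    rcases List.mem_flatMap.mp h with ⟨k, hk, hmem⟩
    rcases List.mem_map.mp hmem with ⟨i, hi, rfl⟩
    have hi' := PySem.List.mem_pyRange_one.mp hi
    have h0i : 0 ≤ i := hi'.1
    have h0k : 0 ≤ k := hL k hk
    rw [PySem.Str.toList_slice, PySem.Chars.slice_eq_listSlice,
        PySem.List.slice_toNat _ h0i (by omega)]
    exact ((List.take_prefix _ _).isInfix).trans ((List.drop_suffix _ _).isInfix)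
  · rintro ⟨t, u, h⟩
    refine List.mem_flatMap.mpr ⟨PySem.Str.len c, hc, List.mem_map.mpr
      ⟨(t.length : Int), ?_, ?_⟩⟩
    · have hlen : hints.toList.length = t.length + c.toList.length + u.length := by
        rw [← h]; simp [List.length_append]; omega
      refine PySem.List.mem_pyRange_one.mpr ⟨by positivity, ?_⟩
      rw [PySem.Str.len_eq, PySem.Str.len_eq, hlen]
      push_cast; omega
    · apply String.toList_inj.mp
      rw [PySem.Str.toList_slice, PySem.Chars.slice_eq_listSlice, PySem.Str.len_eq,
          PySem.List.slice_natCast_add hints.toList t.length c.toList.length, ← h,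
          List.append_assoc, List.drop_left, List.take_left]

-- every component length of an object in the list is indexed
theorem len_mem_lengths (all_objects : List (String × String)) (split_words : Bool)
    {p : String × String} (hp : p ∈ all_objects) {c : String}
    (hcp : c ∈ pvComponents split_words p.1 p.2) :
    PySem.Str.len c ∈ (pvLengths all_objects split_words : List Int) := by
  unfold pvLengths
  exact (PySem.Set.mem_ofList _ _).mpr
    (List.mem_flatMap.mpr ⟨p, hp, List.mem_map.mpr ⟨c, hcp, rfl⟩⟩)

theorem lengths_nonneg (all_objects : List (String × String)) (split_words : Bool) :
    ∀ k ∈ (pvLengths all_objects split_words : List Int), 0 ≤ k := by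
  intro k hk
  unfold pvLengths at hk
  rcases List.mem_flatMap.mp ((PySem.Set.mem_ofList _ _).mp hk) with ⟨p, _, hm⟩
  rcases List.mem_map.mp hm with ⟨c, _, rfl⟩
  rw [PySem.Str.len_eq]; positivity

-- for a component of a listed object, B's index query equals A's substring test
theorem contains_subs_eq_isIn (all_objects : List (String × String)) (hints : String)
    (split_words : Bool) {p : String × String} (hp : p ∈ all_objects) {c : String}
    (hcp : c ∈ pvComponents split_words p.1 p.2) :
    (pvSubs hints (pvLengths all_objects split_words)).contains c
      = PySem.Str.isIn c hints := by
  have h := mem_subs_iff hints c (pvLengths all_objects split_words)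
    (lengths_nonneg all_objects split_words)
    (len_mem_lengths all_objects split_words hp hcp)
  by_cases hin : PySem.Str.isIn c hints = true
  · rw [hin]
    exact (PySem.Set.contains_iff _ _).mpr ((PySem.Set.mem_ofList _ _).mpr (h.mpr hin))
  · rw [Bool.eq_false_iff.mpr hin, ← Bool.not_eq_true]
    intro hcon
    exact hin (h.mp ((PySem.Set.mem_ofList _ _).mp ((PySem.Set.contains_iff _ _).mp hcon)))

theorem any_congr_mem {α : Type} (l : List α) (p q : α → Bool)
    (h : ∀ x ∈ l, p x = q x) : l.any p = l.any q := by
  induction l with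
  | nil => rfl
  | cons a t ih =>
      simp only [List.any_cons, h a (List.mem_cons_self), ih (fun x hx => h x (List.mem_cons_of_mem a hx))]

-- ===== VERDICT (by name: the statement is the Claim_ definition above) =====
theorem get_hinted_items_spec : Claim_equal_get_hinted_items := by
  intro all_objects hints split_words _dom _pre
  unfold Spec_get_hinted_items get_hinted_items get_hinted_items_alt
  rw [PySem.List.foldl_congr_mem all_objects _
      (fun hinted_items p => if (pvComponents split_words p.1 p.2).any
        (fun c => (pvSubs hints (pvLengths all_objects split_words)).contains c)
        then hinted_items ++ [p.1] else hinted_items) []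
      (by
        intro acc p hp
        have h1 : pvHitA (pvComponents split_words p.1 p.2) hints
            = (pvComponents split_words p.1 p.2).any
              (fun c => (pvSubs hints (pvLengths all_objects split_words)).contains c) := by
          rw [pvHitA_eq_any]
          exact any_congr_mem _ _ _
            (fun c hc => (contains_subs_eq_isIn all_objects hints split_words hp hc).symm)
        show (if pvHitA (pvComponents split_words p.1 p.2) hints = true
              then acc ++ [p.1] else acc) = _
        rw [h1])]
  exact PySem.List.foldl_append_if _ _ _ []
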